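-- pv_equiv track=rewrite | github.com/walkccc/LeetCode | solutions/3523. Make Array Non-decreasing/3523.py | maximumPossibleSize
-- ===== SOURCE A (Python) =====
-- def maximumPossibleSize(nums: list[int]) -> int:
--   ans = 0
--   prev = 0
--
--   for num in nums:
--     if num >= prev:
--       prev = num
--       ans += 1
--
--   return ans
-- ===== SOURCE B (Python) =====
-- def maximumPossibleSize(nums: list[int]) -> int:
--   # Divide and conquer: a segment, processed with an incoming floor, yields
--   # (count of kept elements, outgoing floor). Halves combine by threading the
--   # left half's outgoing floor into the right half.
--   def go(seg, floor):
--     if len(seg) == 1: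
--       x = seg[0]
--       return (1, x) if x >= floor else (0, floor)
--     mid = len(seg) // 2
--     cl, fl = go(seg[:mid], floor)
--     cr, fr = go(seg[mid:], fl)
--     return cl + cr, fr
--
--   if not nums:
--     return 0
--   return go(nums, 0)[0]
-- ===== Notes on version B (the rewrite author's own statement) =====
-- stated objective: alternative
-- what changed: B replaces A's single left-to-right loop by a divide-and-conquer recursion: each half returns (count, outgoing floor) and halves are combined by threading the left half's floor into the right half.
import Mathlib
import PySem

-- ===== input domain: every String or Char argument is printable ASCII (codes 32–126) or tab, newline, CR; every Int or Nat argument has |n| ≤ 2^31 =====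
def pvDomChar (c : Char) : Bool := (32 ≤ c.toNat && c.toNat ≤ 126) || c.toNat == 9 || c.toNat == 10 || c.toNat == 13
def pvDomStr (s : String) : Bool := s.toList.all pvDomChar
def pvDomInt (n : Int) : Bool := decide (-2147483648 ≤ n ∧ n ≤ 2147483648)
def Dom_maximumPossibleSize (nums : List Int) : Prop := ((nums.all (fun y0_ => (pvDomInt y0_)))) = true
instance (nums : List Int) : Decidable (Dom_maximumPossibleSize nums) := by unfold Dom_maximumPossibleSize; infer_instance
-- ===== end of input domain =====

-- Header: B is a divide-and-conquer recursion (count, outgoing floor per half) instead of A's single loop; alternative decomposition, same result.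
-- ===== PORT A =====
def maximumPossibleSizeLoop (state : Int × Int) (nums : List Int) : Int × Int :=
  nums.foldl (fun (st : Int × Int) num =>
    if num ≥ st.2 then (st.1 + 1, num) else st) state

def maximumPossibleSize (nums : List Int) : Int :=
  (maximumPossibleSizeLoop (0, 0) nums).1

-- ===== PORT B =====
-- go seg floor: count of kept elements and outgoing floor of one segment
def pvGo : List Int → Int → Int × Int
  | [], floor => (0, floor)   -- never reached: go is only called on nonempty segments
  | [x], floor => if x ≥ floor then (1, x) else (0, floor)
  | x :: y :: rest, floor =>
      let seg := x :: y :: rest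
      let mid := seg.length / 2
      let (cl, fl) := pvGo (seg.take mid) floor
      let (cr, fr) := pvGo (seg.drop mid) fl
      (cl + cr, fr)
termination_by seg _ => seg.length
decreasing_by
  · simp [List.length_take]; omega
  · simp [List.length_drop]; omega

def maximumPossibleSize_alt (nums : List Int) : Int :=
  if nums = [] then 0 else (pvGo nums 0).1

-- ===== PRECONDITION & SPEC =====
def Spec_maximumPossibleSize (nums : List Int) (out : Int) : Prop := out = maximumPossibleSize_alt nums
instance (nums : List Int) (out : Int) : Decidable (Spec_maximumPossibleSize nums out) := by unfold Spec_maximumPossibleSize; infer_instance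

-- ===== CLAIM (what is proved, stated in full; the proofs are below) =====
def Claim_equal_maximumPossibleSize : Prop := ∀ (nums : List Int), Dom_maximumPossibleSize nums → Spec_maximumPossibleSize nums (maximumPossibleSize nums)

-- ===== LEMMAS AND PROOFS =====

-- the loop's count part is an accumulator: it splits off additively
-- the loop's count part is an accumulator: it splits off additively
theorem pv_loop_shift (nums : List Int) : ∀ (a p : Int),
    maximumPossibleSizeLoop (a, p) nums
      = (a + (maximumPossibleSizeLoop (0, p) nums).1, (maximumPossibleSizeLoop (0, p) nums).2) := by
  induction nums with
  | nil => intro a p; simp [maximumPossibleSizeLoop]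
  | cons x xs ih =>
    intro a p
    by_cases h : x ≥ p
    · simp only [maximumPossibleSizeLoop, List.foldl_cons, if_pos h]
      have h1 := ih (a + 1) x
      have h2 := ih (0 + 1) x
      simp only [maximumPossibleSizeLoop] at h1 h2
      rw [h1, h2]
      simp [Prod.ext_iff]; ring
    · simp only [maximumPossibleSizeLoop, List.foldl_cons, if_neg h]
      exact ih a p

theorem pv_loop_append (l r : List Int) (st : Int × Int) :
    maximumPossibleSizeLoop st (l ++ r) = maximumPossibleSizeLoop (maximumPossibleSizeLoop st l) r := by
  simp [maximumPossibleSizeLoop]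

theorem pvGo_cons_cons (x y : Int) (rest : List Int) (floor : Int) :
    pvGo (x :: y :: rest) floor =
      ((pvGo ((x :: y :: rest).take ((x :: y :: rest).length / 2)) floor).1
         + (pvGo ((x :: y :: rest).drop ((x :: y :: rest).length / 2))
              (pvGo ((x :: y :: rest).take ((x :: y :: rest).length / 2)) floor).2).1,
       (pvGo ((x :: y :: rest).drop ((x :: y :: rest).length / 2))
          (pvGo ((x :: y :: rest).take ((x :: y :: rest).length / 2)) floor).2).2) := by
  rw [pvGo]

theorem pv_go_eq_loop_aux (n : Nat) : ∀ (xs : List Int), xs.length ≤ n → ∀ (floor : Int), xs ≠ [] →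
    pvGo xs floor = maximumPossibleSizeLoop (0, floor) xs := by
  induction n with
  | zero =>
    intro xs hlen floor hne
    cases xs with
    | nil => exact absurd rfl hne
    | cons a t => simp at hlen
  | succ n ih =>
    intro xs hlen floor hne
    match xs with
    | [x] =>
      by_cases h : x ≥ floor <;> simp [pvGo, maximumPossibleSizeLoop, h]
    | x :: y :: rest =>
      have hL : (x :: y :: rest).length = rest.length + 2 := by simp
      have hmid1 : 1 ≤ (x :: y :: rest).length / 2 := by omega
      have hmid2 : (x :: y :: rest).length / 2 < (x :: y :: rest).length := by omega
      have htkL : ((x :: y :: rest).take ((x :: y :: rest).length / 2)).length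
          = (x :: y :: rest).length / 2 := by
        simp [List.length_take]; omega
      have hdrL : ((x :: y :: rest).drop ((x :: y :: rest).length / 2)).length
          = (x :: y :: rest).length - (x :: y :: rest).length / 2 := by
        simp [List.length_drop]
      have htk : (x :: y :: rest).take ((x :: y :: rest).length / 2) ≠ [] := by
        intro h; rw [h] at htkL; simp at htkL; omega
      have hdr : (x :: y :: rest).drop ((x :: y :: rest).length / 2) ≠ [] := by
        intro h; rw [h] at hdrL; simp at hdrL; omega
      rw [pvGo_cons_cons,
          ih _ (by omega) floor htk,
          ih _ (by omega) _ hdr]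
      conv_rhs => rw [← List.take_append_drop ((x :: y :: rest).length / 2) (x :: y :: rest)]
      rw [pv_loop_append]
      rcases hst : maximumPossibleSizeLoop (0, floor)
          ((x :: y :: rest).take ((x :: y :: rest).length / 2)) with ⟨c1, p1⟩
      rw [pv_loop_shift _ c1 p1]

theorem pv_go_eq_loop (xs : List Int) (floor : Int) (hne : xs ≠ []) :
    pvGo xs floor = maximumPossibleSizeLoop (0, floor) xs :=
  pv_go_eq_loop_aux xs.length xs le_rfl floor hne

-- ===== VERDICT (by name: the statement is the Claim_ definition above) =====
theorem maximumPossibleSize_spec : Claim_equal_maximumPossibleSize := by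
  intro nums _
  unfold Spec_maximumPossibleSize maximumPossibleSize maximumPossibleSize_alt
  cases nums with
  | nil => simp [maximumPossibleSizeLoop]
  | cons x xs =>
    rw [if_neg (by simp : ¬(x :: xs = [])), pv_go_eq_loop _ 0 (by simp)]
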